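-- pv_equiv track=rewrite | github.com/zabacad/x690 | x690.py | parse_oid
-- ===== SOURCE A (Python) =====
-- def parse_oid(octets):
--     oid = [octets[0] // 0x40, octets[0] % 0x40]
--
--     offset = 1
--     node = 0
--
--     while offset < len(octets):
--         octet = octets[offset]
--         offset += 1
--
--         node = node << 8 | octet & 0b01111111
--
--         if not octet & 0b10000000:
--             oid.append(node)
--             node = 0
--
--     return '.'.join(str(node) for node in oid)
-- ===== SOURCE B (Python) =====
-- def parse_oid(octets):
--     oid = [octets[0] // 0x40, octets[0] % 0x40]
--     pos = 1
--     n = len(octets)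
--     while pos < n:
--         end = pos
--         while end < n and octets[end] & 0x80:
--             end += 1
--         if end == n:
--             break  # trailing continuation bytes with no terminator form no node
--         node = 0
--         for b in octets[pos:end + 1]:
--             node = node << 8 | b & 0x7f
--         oid.append(node)
--         pos = end + 1
--     return '.'.join(str(n) for n in oid)
-- ===== Notes on version B (the rewrite author's own statement) =====
-- stated objective: alternative
-- what changed: Replaces A's single running-accumulator scan with a group-at-a-time decomposition: repeatedly scan to the next terminator byte (high bit clear), fold that completed group into a node, and advance past it; a trailing unterminated group naturally yields no node.
import Mathlib
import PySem

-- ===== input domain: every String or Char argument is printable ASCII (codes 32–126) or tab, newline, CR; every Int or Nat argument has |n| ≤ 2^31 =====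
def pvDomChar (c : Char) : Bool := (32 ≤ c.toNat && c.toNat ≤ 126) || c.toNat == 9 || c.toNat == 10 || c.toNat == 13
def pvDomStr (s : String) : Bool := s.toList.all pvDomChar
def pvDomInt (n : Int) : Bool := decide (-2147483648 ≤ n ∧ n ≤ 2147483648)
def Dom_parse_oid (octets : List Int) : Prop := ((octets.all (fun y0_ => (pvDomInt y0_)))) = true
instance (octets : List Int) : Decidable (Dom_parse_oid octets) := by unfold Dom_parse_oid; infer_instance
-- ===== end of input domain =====

-- B replaces A's running-accumulator scan by a group-at-a-time decomposition (find terminator, fold the slice); equivalence of return values is proved on nonempty input.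

-- ===== PORT A =====
-- A's while-loop over octets[1:] as a foldl carrying (oid, node); indexing the first element raises IndexError on empty input, excluded by Pre_.
def parse_oid (octets : List Int) : String :=
  match octets with
  | [] => ""  -- unreachable under Pre_parse_oid (Python raises IndexError)
  | h :: t =>
    let s := t.foldl (fun (s : List Int × Int) octet =>
      let node := PySem.Int.bor (s.2 <<< (8 : Nat)) (PySem.Int.band octet 127)
      if PySem.Int.band octet 128 == 0 then (s.1 ++ [node], 0) else (s.1, node))
      ([PySem.Int.floordiv h 64, PySem.Int.mod h 64], 0)
    PySem.Str.join "." (s.1.map PySem.Int.toStr)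

-- ===== PORT B =====
-- node computed by folding one completed group's bytes (Source B's inner for-loop)
def pvGroupNode (bs : List Int) : Int :=
  bs.foldl (fun node b => PySem.Int.bor (node <<< (8 : Nat)) (PySem.Int.band b 127)) 0

-- Source B's while-loop: split rest at the first terminator byte (high bit clear); no terminator → stop.
def pvGroups (rest : List Int) : List Int :=
  match _h : rest.dropWhile (fun b => !(PySem.Int.band b 128 == 0)) with
  | [] => []
  | term :: rest' =>
      pvGroupNode (rest.takeWhile (fun b => !(PySem.Int.band b 128 == 0)) ++ [term]) :: pvGroups rest'
termination_by rest.length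
decreasing_by
  have hle := List.length_dropWhile_le (p := fun b => !(PySem.Int.band b 128 == 0)) (l := rest)
  simp [_h] at hle
  omega

def parse_oid_alt (octets : List Int) : String :=
  match octets with
  | [] => ""  -- unreachable under Pre_parse_oid (Python raises IndexError)
  | h :: t =>
    PySem.Str.join "."
      ((PySem.Int.floordiv h 64 :: PySem.Int.mod h 64 :: pvGroups t).map PySem.Int.toStr)

-- ===== PRECONDITION & SPEC =====
-- Pre_ excludes only the empty list, on which Python A (and B) raise IndexError when reading the first element.
def Pre_parse_oid (octets : List Int) : Prop := octets ≠ []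
instance (octets : List Int) : Decidable (Pre_parse_oid octets) := by unfold Pre_parse_oid; infer_instance
def pvWitness_parse_oid : List Int := ([42, 134, 72, 206, 61, 3])

def Spec_parse_oid (octets : List Int) (out : String) : Prop := out = parse_oid_alt octets
instance (octets : List Int) (out : String) : Decidable (Spec_parse_oid octets out) := by unfold Spec_parse_oid; infer_instance

-- ===== CLAIM (what is proved, stated in full; the proofs are below) =====
def Claim_equal_parse_oid : Prop := ∀ (octets : List Int), Dom_parse_oid octets → Pre_parse_oid octets → Spec_parse_oid octets (parse_oid octets)

-- ===== LEMMAS AND PROOFS =====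

-- A's loop body / B's group fold step
def pvStep (node b : Int) : Int := PySem.Int.bor (node <<< (8 : Nat)) (PySem.Int.band b 127)

-- gAcc: A's loop viewed as producing the list of appended nodes
def pvGAcc (node : Int) : List Int → List Int
  | [] => []
  | b :: t =>
    if PySem.Int.band b 128 == 0 then pvStep node b :: pvGAcc 0 t else pvGAcc (pvStep node b) t

theorem pvFold_eq (t : List Int) : ∀ (oid : List Int) (node : Int),
    (t.foldl (fun (s : List Int × Int) octet =>
      let node := PySem.Int.bor (s.2 <<< (8 : Nat)) (PySem.Int.band octet 127)
      if PySem.Int.band octet 128 == 0 then (s.1 ++ [node], 0) else (s.1, node))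
      (oid, node)).1 = oid ++ pvGAcc node t := by
  induction t with
  | nil => intro oid node; simp [pvGAcc]
  | cons b t ih =>
    intro oid node
    rw [List.foldl_cons]
    by_cases hb : PySem.Int.band b 128 == 0
    · dsimp only; rw [if_pos hb, ih]; simp [pvGAcc, hb, pvStep]
    · dsimp only; rw [if_neg hb, ih]; simp [pvGAcc, hb, pvStep]

theorem pvGAcc_run (pre : List Int) (hpre : ∀ b ∈ pre, ¬ (PySem.Int.band b 128 == 0)) :
    ∀ (node : Int) (rest : List Int),
    pvGAcc node (pre ++ rest) = pvGAcc (pre.foldl pvStep node) rest := by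
  induction pre with
  | nil => intro node rest; rfl
  | cons b p ih =>
    intro node rest
    have hb : ¬ (PySem.Int.band b 128 == 0) := hpre b (by simp)
    simp only [List.cons_append, pvGAcc, if_neg hb, List.foldl]
    exact ih (fun x hx => hpre x (by simp [hx])) _ _

theorem pvGroupNode_eq (bs : List Int) : pvGroupNode bs = bs.foldl pvStep 0 := rfl

theorem pvGroups_eq (t : List Int) : pvGroups t = pvGAcc 0 t := by
  induction hn : t.length using Nat.strong_induction_on generalizing t with
  | _ n ih =>
  subst hn
  rw [pvGroups]
  cases hd : t.dropWhile (fun b => !(PySem.Int.band b 128 == 0)) with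
  | nil =>
    have ht : t = t.takeWhile (fun b => !(PySem.Int.band b 128 == 0)) := by
      conv_lhs => rw [← List.takeWhile_append_dropWhile (p := fun b => !(PySem.Int.band b 128 == 0)) (l := t)]
      simp [hd]
    rw [ht, ← List.append_nil (t.takeWhile _)]
    rw [pvGAcc_run _ (fun b hb => by
      have := List.mem_takeWhile_imp hb
      simpa using this)]
    rfl
  | cons term rest' =>
    have ht : t = t.takeWhile (fun b => !(PySem.Int.band b 128 == 0)) ++ term :: rest' := by
      conv_lhs => rw [← List.takeWhile_append_dropWhile (p := fun b => !(PySem.Int.band b 128 == 0)) (l := t)]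
      simp [hd]
    have hterm : PySem.Int.band term 128 == 0 := by
      have := List.head?_dropWhile_not (p := fun b => !(PySem.Int.band b 128 == 0)) (l := t)
      rw [hd] at this
      simpa using this
    have hlen : rest'.length < t.length := by
      have hle := List.length_dropWhile_le (p := fun b => !(PySem.Int.band b 128 == 0)) (l := t)
      simp [hd] at hle; omega
    conv_rhs => rw [ht]
    rw [pvGAcc_run _ (fun b hb => by
      have := List.mem_takeWhile_imp hb
      simpa using this)]
    simp only [pvGAcc, if_pos hterm]
    rw [ih rest'.length hlen rest' rfl, pvGroupNode_eq, List.foldl_append]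
    simp [List.foldl]

-- ===== VERDICT (by name: the statement is the Claim_ definition above) =====
theorem parse_oid_spec : Claim_equal_parse_oid := by
  intro octets _ hpre
  unfold Spec_parse_oid
  match octets with
  | [] => exact absurd rfl hpre
  | h :: t =>
    simp only [parse_oid, parse_oid_alt, pvFold_eq, pvGroups_eq]
    rfl
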